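-- pv_equiv track=rewrite | github.com/lganic/Logan-Boehm-Website | utility/string_helpers.py | quasi_equal_at_location
-- ===== SOURCE A (Python) =====
-- def quasi_equal_at_location(string:str , location: int, key: str):
--     '''
--     Check if a string contains the key at location, irrespective of spaces and case
--     '''
--
--     if ' ' in key:
--         raise ValueError('Spaces invalid for quasi equal')
--
--     if string[location] == ' ':
--         return False
--
--     for index, key_value in enumerate(key):
--
--         while string[location] == ' ':
--             location += 1
--
--             if location == len(string):
--                 return False
--
--         if string[location].lower() != key_value.lower():
--             return False
--
--         if index == len(key) - 1:
--             return True
--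
--         location += 1
--
--         if location == len(string):
--             return False
--
--     return True
-- ===== SOURCE B (Python) =====
-- def quasi_equal_at_location(string: str, location: int, key: str):
--     '''
--     Check if a string contains the key at location, irrespective of spaces and case
--     '''
--
--     if ' ' in key:
--         raise ValueError('Spaces invalid for quasi equal')
--
--     if string[location] == ' ':
--         return False
--
--     if not key:
--         return True
--
--     ki = 0
--     for p in range(location, len(string)):
--         c = string[p]
--         if c == ' ':
--             continue
--         if c.lower() != key[ki].lower():
--             return False
--         ki += 1
--         if ki == len(key):
--             return True
--     return False
-- ===== Notes on version B (the rewrite author's own statement) =====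
-- stated objective: simpler
-- what changed: Replaces A's nested loop (for over key characters with an inner while that skips spaces and two separate end-of-string checks) by a single flat scan over string positions range(location, len(string)) with continue on spaces and one separately advanced key index.
import Mathlib
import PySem

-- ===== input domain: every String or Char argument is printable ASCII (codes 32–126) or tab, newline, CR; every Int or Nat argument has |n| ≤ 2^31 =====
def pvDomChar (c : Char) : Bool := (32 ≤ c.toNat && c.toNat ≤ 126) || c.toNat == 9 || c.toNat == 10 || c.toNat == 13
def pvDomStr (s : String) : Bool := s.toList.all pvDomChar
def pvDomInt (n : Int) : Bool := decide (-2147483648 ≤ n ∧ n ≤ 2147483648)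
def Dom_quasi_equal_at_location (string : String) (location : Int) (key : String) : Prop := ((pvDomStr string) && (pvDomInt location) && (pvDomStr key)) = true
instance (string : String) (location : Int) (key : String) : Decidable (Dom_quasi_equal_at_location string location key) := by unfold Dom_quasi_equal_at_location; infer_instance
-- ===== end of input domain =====

-- B replaces A's nested for-over-key-with-inner-space-skipping-while by a single scan over
-- string positions with a separately advanced key index (objective: simpler decomposition).

-- ===== PORT A =====
-- inner 'while string[location] == " "' loop of A: returns the first non-space position,
-- none where A returns False (position counter reaches len) or raises IndexError (excluded by Pre_)
def pvSkipA (s : List Char) (loc : Int) : Option Int :=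
  match h : PySem.List.pyGet? s loc with
  | none => none          -- IndexError: excluded by Pre_
  | some c =>
    if c = ' ' then
      if loc + 1 = (s.length : Int) then none
      else pvSkipA s (loc + 1)
    else some loc
termination_by ((s.length : Int) - loc).toNat
decreasing_by
  have hr : PySem.Raise.InRange s.length loc := by
    by_contra hc
    rw [(PySem.List.pyGet?_eq_none_iff s loc).mpr hc] at h
    simp at h
  obtain ⟨_, hu⟩ := hr
  omega  -- the measure decreases: loc + 1 under ¬(loc + 1 = len) with loc < len

-- A's 'for index, key_value in enumerate(key)' loop body
def pvLoopA (s : List Char) (loc : Int) (ks : List Char) (idx klen : Nat) : Bool :=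
  match ks with
  | [] => true
  | k :: rest =>
    match pvSkipA s loc with
    | none => false
    | some loc' =>
      match PySem.List.pyGet? s loc' with
      | none => false    -- IndexError: excluded by Pre_
      | some c =>
        if PySem.Chars.lowerChar c ≠ PySem.Chars.lowerChar k then false
        else if idx = klen - 1 then true
        else if loc' + 1 = (s.length : Int) then false
        else pvLoopA s (loc' + 1) rest (idx + 1) klen

def quasi_equal_at_location (string : String) (location : Int) (key : String) : Bool :=
  if key.toList.contains ' ' then false     -- Python raises ValueError here: excluded by Pre_
  else
    match PySem.Str.pyGet? string location with
    | none => false                          -- IndexError: excluded by Pre_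
    | some c =>
      if c = ' ' then false
      else pvLoopA string.toList location key.toList 0 key.toList.length

-- ===== PORT B =====
-- B's 'for p in range(location, len(string))' scan with key index ki
def pvLoopB (s : List Char) (key : List Char) (p : Int) (ki : Nat) : Bool :=
  if p < (s.length : Int) then
    match PySem.List.pyGet? s p with
    | none => false                          -- IndexError: excluded by Pre_
    | some c =>
      if c = ' ' then pvLoopB s key (p + 1) ki
      else
        match key[ki]? with
        | none => false                      -- unreachable under Pre_: ki < len key throughout
        | some k =>
          if PySem.Chars.lowerChar c ≠ PySem.Chars.lowerChar k then false
          else if ki + 1 = key.length then true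
          else pvLoopB s key (p + 1) (ki + 1)
  else false
termination_by ((s.length : Int) - p).toNat
decreasing_by all_goals omega

def quasi_equal_at_location_alt (string : String) (location : Int) (key : String) : Bool :=
  if key.toList.contains ' ' then false     -- Python raises ValueError here: excluded by Pre_
  else
    match PySem.Str.pyGet? string location with
    | none => false                          -- IndexError: excluded by Pre_
    | some c =>
      if c = ' ' then false
      else if key.toList.isEmpty then true
      else pvLoopB string.toList key.toList location 0

-- ===== PRECONDITION & SPEC =====
-- Pre_ excludes exactly the inputs where Python A raises: a space in key (ValueError) and an
-- out-of-range location (IndexError).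
def Pre_quasi_equal_at_location (string : String) (location : Int) (key : String) : Prop :=
  ¬ (' ' ∈ key.toList) ∧ PySem.Raise.InRange string.toList.length location
instance (string : String) (location : Int) (key : String) : Decidable (Pre_quasi_equal_at_location string location key) := by unfold Pre_quasi_equal_at_location; infer_instance

def pvWitness_quasi_equal_at_location : String × Int × String := ("a bC", 1, "Bc")

def Spec_quasi_equal_at_location (string : String) (location : Int) (key : String) (out : Bool) : Prop := out = quasi_equal_at_location_alt string location key
instance (string : String) (location : Int) (key : String) (out : Bool) : Decidable (Spec_quasi_equal_at_location string location key out) := by unfold Spec_quasi_equal_at_location; infer_instance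

-- ===== CLAIM (what is proved, stated in full; the proofs are below) =====
def Claim_equal_quasi_equal_at_location : Prop := ∀ (string : String) (location : Int) (key : String), Dom_quasi_equal_at_location string location key → Pre_quasi_equal_at_location string location key → Spec_quasi_equal_at_location string location key (quasi_equal_at_location string location key)

-- ===== LEMMAS AND PROOFS =====

lemma pvSkipA_some_props (s : List Char) (p p' : Int) (h : pvSkipA s p = some p') :
    PySem.Raise.InRange s.length p' ∧ ∃ c, PySem.List.pyGet? s p' = some c ∧ c ≠ ' ' := by
  induction p using pvSkipA.induct s with
  | case1 x h' => rw [pvSkipA.eq_def, h'] at h; simp at h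
  | case2 x hend h' => rw [pvSkipA.eq_def, h'] at h; simp [hend] at h
  | case3 x hend h' ih =>
      rw [pvSkipA.eq_def, h'] at h
      simp only [if_neg hend] at h
      exact ih h
  | case4 x c h' hc =>
      rw [pvSkipA.eq_def, h'] at h
      simp [hc] at h
      rw [← h]
      refine ⟨?_, c, h', hc⟩
      have hne : PySem.List.pyGet? s x ≠ none := by rw [h']; simp
      rw [ne_eq, PySem.List.pyGet?_eq_none_iff] at hne
      exact not_not.mp hne

-- B's scan from p equals B's scan from the first non-space position (or false where A's skip
-- walk runs off the end)
lemma pvLoopB_skip (s : List Char) (key : List Char) (ki : Nat) (p : Int)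
    (hr : PySem.Raise.InRange s.length p) :
    pvLoopB s key p ki = (match pvSkipA s p with | none => false | some p' => pvLoopB s key p' ki) := by
  induction p using pvSkipA.induct s with
  | case1 x h' =>
      rw [PySem.List.pyGet?_eq_none_iff] at h'
      exact absurd hr h'
  | case2 x hend h' =>
      rw [pvSkipA.eq_def, h']
      simp only [if_pos hend]
      rw [pvLoopB.eq_def, if_pos hr.2, h']
      rw [pvLoopB.eq_def, hend]
      simp
  | case3 x hend h' ih =>
      rw [pvSkipA.eq_def, h']
      simp only [if_neg hend]
      rw [pvLoopB.eq_def, if_pos hr.2, h']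
      have hx1 : x + 1 < (s.length : Int) := by
        have := hr.2; omega
      rw [ih ⟨by have := hr.1; omega, hx1⟩]
      simp
  | case4 x c h' hc =>
      rw [pvSkipA.eq_def, h']
      simp only [if_neg hc]

-- main simulation: A's per-key-char loop equals B's per-position scan
lemma pvLoop_eq (s key : List Char) (ks : List Char) (ki : Nat) (p : Int)
    (hks : key.drop ki = ks) (hne : ks ≠ []) (hr : PySem.Raise.InRange s.length p) :
    pvLoopA s p ks ki key.length = pvLoopB s key p ki := by
  induction ks generalizing ki p with
  | nil => exact absurd rfl hne
  | cons k rest ih =>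
    have hki : ki < key.length := by
      by_contra hc
      rw [List.drop_eq_nil_of_le (by omega)] at hks
      simp at hks
    have hget : key[ki]? = some k := by
      have h0 : (key.drop ki)[0]? = some k := by rw [hks]; rfl
      rw [List.getElem?_drop, Nat.add_zero] at h0
      exact h0
    rw [pvLoopA, pvLoopB_skip s key ki p hr]
    cases hskip : pvSkipA s p with
    | none => rfl
    | some p' =>
      obtain ⟨hr', c, hc, hcsp⟩ := pvSkipA_some_props s p p' hskip
      simp only []
      rw [pvLoopB.eq_def, if_pos hr'.2, hc]
      simp only [if_neg hcsp, hget, ne_eq, ite_not]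
      by_cases hlow : PySem.Chars.lowerChar c = PySem.Chars.lowerChar k
      · rw [if_pos hlow, if_pos hlow]
        have hiff : (ki = key.length - 1) ↔ (ki + 1 = key.length) := by omega
        by_cases hlast : ki + 1 = key.length
        · rw [if_pos (hiff.mpr hlast), if_pos hlast]
        · rw [if_neg (fun hh => hlast (hiff.mp hh)), if_neg hlast]
          by_cases hendd : p' + 1 = (s.length : Int)
          · rw [if_pos hendd, pvLoopB.eq_def]
            simp [hendd]
          · rw [if_neg hendd]
            have hrest : key.drop (ki + 1) = rest := by
              have := congrArg List.tail hks
              rwa [← List.drop_one, List.drop_drop] at this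
            refine ih (ki + 1) (p' + 1) hrest ?_ ⟨by have := hr'.1; omega, by have := hr'.2; omega⟩
            intro hnil
            rw [hnil, List.drop_eq_nil_iff] at hrest
            omega
      · rw [if_neg hlow, if_neg hlow]

-- ===== VERDICT (by name: the statement is the Claim_ definition above) =====
theorem quasi_equal_at_location_spec : Claim_equal_quasi_equal_at_location := by
  intro string location key _ hpre
  obtain ⟨hsp, hrange⟩ := hpre
  unfold Spec_quasi_equal_at_location quasi_equal_at_location quasi_equal_at_location_alt
  have hcont : key.toList.contains ' ' = false := by
    simp [List.contains_eq_mem]; exact hsp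
  rw [hcont]
  simp only [Bool.false_eq_true, if_false]
  have hglist : PySem.Str.pyGet? string location = PySem.List.pyGet? string.toList location := rfl
  cases hget : PySem.Str.pyGet? string location with
  | none =>
      exfalso
      rw [hglist, PySem.List.pyGet?_eq_none_iff] at hget
      exact hget hrange
  | some c =>
      by_cases hc : c = ' '
      · simp [hc]
      · simp only [hc, if_false]
        cases hkey : key.toList with
        | nil => simp [pvLoopA, List.isEmpty_nil]
        | cons k0 krest =>
          simp only [List.isEmpty_cons, Bool.false_eq_true, if_false]
          rw [← hkey]
          exact pvLoop_eq string.toList key.toList key.toList 0 location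
            List.drop_zero (by rw [hkey]; simp) hrange
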